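-- pv_equiv track=rewrite | github.com/ELBITI/Bat-detection | helper.py | _downsample_scores
-- ===== SOURCE A (Python) =====
-- import math
--
-- def _downsample_scores(scores, max_bins=400):
--     if not scores:
--         return [], 1
--     if len(scores) <= max_bins:
--         return scores, 1
--     bin_size = int(math.ceil(len(scores) / max_bins))
--     binned = []
--     for i in range(0, len(scores), bin_size):
--         binned.append(int(max(scores[i:i + bin_size])))
--     return binned, bin_size
-- ===== SOURCE B (Python) =====
-- import math
--
-- def _downsample_scores(scores, max_bins=400):
--     if not scores:
--         return [], 1
--     if len(scores) <= max_bins: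
--         return scores, 1
--     bin_size = int(math.ceil(len(scores) / max_bins))
--     binned = []
--     cur = None
--     for i, s in enumerate(scores):
--         if i % bin_size == 0:
--             if cur is not None:
--                 binned.append(int(cur))
--             cur = s
--         elif s > cur:
--             cur = s
--     binned.append(int(cur))
--     return binned, bin_size
-- ===== Notes on version B (the rewrite author's own statement) =====
-- stated objective: alternative
-- what changed: Replaces the slice-per-bin loop (re-slicing the list and calling max() on each chunk) by a single linear pass over enumerate(scores) that maintains a running per-bin maximum and flushes it whenever the index reaches a new bin boundary (i % bin_size == 0).
-- outside the precondition, e.g. on _downsample_scores([1, 2], -1): A returns ([], -2), B returns ([2], -2)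
import Mathlib
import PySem

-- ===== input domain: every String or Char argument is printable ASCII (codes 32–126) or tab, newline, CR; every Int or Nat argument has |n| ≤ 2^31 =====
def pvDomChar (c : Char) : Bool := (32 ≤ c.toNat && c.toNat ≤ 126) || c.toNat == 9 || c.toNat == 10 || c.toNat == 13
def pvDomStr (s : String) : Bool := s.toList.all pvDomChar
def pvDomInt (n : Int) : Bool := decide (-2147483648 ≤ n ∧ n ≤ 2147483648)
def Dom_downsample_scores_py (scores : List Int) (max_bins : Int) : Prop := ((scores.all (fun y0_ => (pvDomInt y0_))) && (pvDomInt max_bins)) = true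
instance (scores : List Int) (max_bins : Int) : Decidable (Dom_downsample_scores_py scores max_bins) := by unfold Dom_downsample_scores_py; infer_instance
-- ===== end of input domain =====

-- B replaces A's slice-per-bin loop by a single pass over enumerate(scores) keeping a running per-bin
-- maximum that is flushed at each bin boundary (alternative decomposition, same asymptotic cost).


-- ===== PORT A =====
-- bin_size = int(math.ceil(len(scores) / max_bins)): for lengths in this domain the float
-- division rounds to a value whose ceil equals the exact ceiling, ported as -((-n) // m).
def downsample_scores_py (scores : List Int) (max_bins : Int) : List Int × Int :=
  if scores = [] then ([], 1)
  else if (scores.length : Int) ≤ max_bins then (scores, 1)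
  else
    let bin_size : Int := -(PySem.Int.floordiv (-(scores.length : Int)) max_bins)
    let binned := (PySem.List.pyRange 0 (scores.length : Int) bin_size).foldl
      (fun acc i => acc ++
        (match PySem.List.max? (PySem.List.slice scores (some i) (some (i + bin_size))) (fun y => y) with
         | some m => [m]       -- max(scores[i:i+bin_size]); the slice is nonempty whenever this loop runs
         | none => [])) []
    (binned, bin_size)

-- ===== PORT B =====
-- loop body of Source B: state = (binned, cur); flush cur and restart the bin when i % bin_size == 0
def pvFlush (st : List Int × Option Int) : List Int :=
  match st.2 with
  | some c => st.1 ++ [c]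
  | none => st.1

def pvStep (bin_size : Int) (st : List Int × Option Int) (p : Int × Int) : List Int × Option Int :=
  if PySem.Int.mod p.1 bin_size = 0 then
    (pvFlush st, some p.2)
  else
    match st.2 with
    | some c => (st.1, some (if p.2 > c then p.2 else c))
    | none => st          -- unreachable on Pre_ (Python B would raise comparing with None)

def downsample_scores_py_alt (scores : List Int) (max_bins : Int) : List Int × Int :=
  if scores = [] then ([], 1)
  else if (scores.length : Int) ≤ max_bins then (scores, 1)
  else
    let bin_size : Int := -(PySem.Int.floordiv (-(scores.length : Int)) max_bins)
    let st := (PySem.List.enumerate scores 0).foldl (pvStep bin_size) ([], none)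
    (pvFlush st, bin_size)

-- ===== PRECONDITION & SPEC =====
-- Pre_ restricts max_bins to the natural domain of a bin count when scores is nonempty:
-- for max_bins = 0 A raises ZeroDivisionError, and for negative max_bins A's empty
-- negative-step range returns an accidental ([], negative bin_size).
def Pre_downsample_scores_py (scores : List Int) (max_bins : Int) : Prop :=
  scores = [] ∨ 0 < max_bins
instance (scores : List Int) (max_bins : Int) : Decidable (Pre_downsample_scores_py scores max_bins) := by unfold Pre_downsample_scores_py; infer_instance

def pvWitness_downsample_scores_py : List Int × Int := ([1, 2, 3], 2)

def Spec_downsample_scores_py (scores : List Int) (max_bins : Int) (out : List Int × Int) : Prop := out = downsample_scores_py_alt scores max_bins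
instance (scores : List Int) (max_bins : Int) (out : List Int × Int) : Decidable (Spec_downsample_scores_py scores max_bins out) := by unfold Spec_downsample_scores_py; infer_instance

-- ===== CLAIM (what is proved, stated in full; the proofs are below) =====
def Claim_equal_downsample_scores_py : Prop := ∀ (scores : List Int) (max_bins : Int), Dom_downsample_scores_py scores max_bins → Pre_downsample_scores_py scores max_bins → Spec_downsample_scores_py scores max_bins (downsample_scores_py scores max_bins)

-- ===== LEMMAS AND PROOFS =====

def pvChunks (xs : List Int) (k : Nat) : List Int :=
  match xs with
  | [] => []
  | x :: t => ((t.take (k - 1)).foldl max x) :: pvChunks (t.drop (k - 1)) k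
termination_by xs.length
decreasing_by simp


lemma pv_range_decomp (n k : Int) (hk : 0 < k) (hn : 0 < n) :
    PySem.List.pyRange 0 n k = 0 :: (PySem.List.pyRange 0 (n - k) k).map (· + k) := by
  rw [PySem.List.pyRange_of_pos _ _ hk, PySem.List.pyRange_of_pos _ _ hk]
  have h1 : (n - 0 + k - 1) / k = (n - 1) / k + 1 := by
    have h := Int.add_mul_ediv_right (n - 1) 1 (ne_of_gt hk)
    rw [one_mul] at h
    rw [show n - 0 + k - 1 = n - 1 + k by ring, h]
  have hge : 0 ≤ (n - 1) / k := Int.ediv_nonneg (by omega) (le_of_lt hk)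
  by_cases hnk : 0 < n - k
  · have h2 : (n - k - 0 + k - 1) / k = (n - 1) / k := by ring_nf
    rw [if_pos hn, if_pos hnk, h1, h2]
    have : ((n - 1) / k + 1).toNat = ((n - 1) / k).toNat + 1 := by omega
    rw [this, List.range_succ_eq_map]
    simp [List.map_map, Function.comp]
    intro a _
    ring
  · have h0 : (n - 1) / k = 0 := Int.ediv_eq_zero_of_lt (by omega) (by omega)
    rw [if_pos hn, if_neg hnk, h1, h0]
    simp

lemma pv_range_empty (n k : Int) (hk : 0 < k) (hn : n ≤ 0) :
    PySem.List.pyRange 0 n k = [] := by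
  rw [PySem.List.pyRange_of_pos _ _ hk, if_neg (by omega)]
  simp

lemma pv_A_eq_chunks (xs : List Int) (k : Nat) (hk : 0 < k) :
    (PySem.List.pyRange 0 (xs.length : Int) (k : Int)).flatMap
        (fun i =>
          match PySem.List.max? (PySem.List.slice xs (some i) (some (i + (k : Int)))) (fun y => y) with
          | some m => [m]
          | none => []) = pvChunks xs k := by
  induction xs using pvChunks.induct k with
  | case1 => simp [pv_range_empty 0 k (by exact_mod_cast hk) le_rfl, pvChunks]
  | case2 x t ih =>
    rw [pv_range_decomp _ _ (by exact_mod_cast hk) (by exact_mod_cast Nat.succ_pos t.length), List.flatMap_cons, List.flatMap_map]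
    have hhead : PySem.List.slice (x :: t) (some 0) (some (0 + (k : Int))) = x :: t.take (k - 1) := by
      rw [zero_add, PySem.List.slice_zero_start, PySem.List.slice_to_natCast]
      obtain ⟨k', hk'⟩ : ∃ k', k = k' + 1 := ⟨k - 1, by omega⟩
      subst hk'
      simp [List.take_succ_cons]
    rw [hhead, PySem.List.max?_id_cons]
    rw [pvChunks]
    show List.foldl max x (t.take (k - 1)) :: _ = _
    congr 1
    by_cases hlen : k ≤ (x :: t).length
    · have hys : ((x :: t).length : Int) - (k : Int) = ((t.drop (k - 1)).length : Int) := by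
        simp only [List.length_cons, List.length_drop] at hlen ⊢; omega
      rw [hys]
      rw [List.flatMap_congr (g := fun j =>
          match PySem.List.max? (PySem.List.slice (t.drop (k - 1)) (some j) (some (j + (k : Int)))) (fun y => y) with
          | some m => [m]
          | none => []) ?_]
      · exact ih
      · intro j hj
        beta_reduce
        obtain ⟨hj0, -, -⟩ := (PySem.List.mem_pyRange_iff_of_pos (by exact_mod_cast hk) j).mp hj
        obtain ⟨jn, rfl⟩ := Int.eq_ofNat_of_zero_le hj0
        rw [PySem.List.slice_natCast_add (t.drop (k - 1)) jn k,
            show ((jn : Int) + k + k) = (((jn + k : Nat) : Int) + ((k : Nat) : Int)) by push_cast; ring,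
            show ((jn : Int) + k) = ((jn + k : Nat) : Int) by push_cast; ring,
            PySem.List.slice_natCast_add, List.drop_drop,
            show jn + k = ((k - 1) + jn) + 1 by omega, List.drop_succ_cons]
    · have hys : ((x :: t).length : Int) - (k : Int) ≤ 0 := by simp at hlen ⊢; omega
      rw [pv_range_empty _ _ (by exact_mod_cast hk) hys]
      have : t.drop (k - 1) = [] := List.drop_eq_nil_of_le (by simp at hlen; omega)
      rw [this]
      simp [pvChunks]

lemma pv_B_inner (k : Nat) (u : List Int) :
    ∀ (o : Int) (b : List Int) (c : Int),
      (∀ i : Int, o ≤ i → i < o + u.length → ¬ ((k : Int) ∣ i)) →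
      (PySem.List.enumerate u o).foldl (pvStep (k : Int)) (b, some c) = (b, some (u.foldl max c)) := by
  induction u with
  | nil => intro o b c _; simp [PySem.List.enumerate]
  | cons y u ih =>
    intro o b c h
    rw [PySem.List.enumerate_cons, List.foldl_cons]
    have hndvd : ¬ ((k : Int) ∣ o) := h o le_rfl (by simp)
    have hmod : ¬ (PySem.Int.mod o (k : Int) = 0) := fun hc => hndvd ((PySem.Int.mod_eq_zero_iff_dvd _ _).mp hc)
    have hstep : pvStep (k : Int) (b, some c) (o, y) = (b, some (max c y)) := by
      simp only [pvStep, if_neg hmod]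
      have : (if y > c then y else c) = max c y := by
        rcases max_cases c y with ⟨h1, h2⟩ | ⟨h1, h2⟩ <;> simp [h1] <;> omega
      rw [this]
    rw [hstep, List.foldl_cons]
    exact ih (o + 1) b (max c y) (fun i h1 h2 => h i (by omega) (by simp only [List.length_cons] at h2 ⊢; push_cast at h2 ⊢; omega))

lemma pv_B_outer (k : Nat) (hk : 0 < k) (xs : List Int) :
    ∀ (o : Int), 0 ≤ o → (k : Int) ∣ o → ∀ (b : List Int) (cur : Option Int),
      pvFlush ((PySem.List.enumerate xs o).foldl (pvStep (k : Int)) (b, cur)) =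
        pvFlush (b, cur) ++ pvChunks xs k := by
  induction xs using pvChunks.induct k with
  | case1 => intro o _ _ b cur; simp [PySem.List.enumerate, pvChunks]
  | case2 x t ih =>
    intro o ho hdvd b cur
    rw [PySem.List.enumerate_cons, List.foldl_cons]
    have hmod : PySem.Int.mod o (k : Int) = 0 := (PySem.Int.mod_eq_zero_iff_dvd _ _).mpr hdvd
    have hstep : pvStep (k : Int) (b, cur) (o, x) = (pvFlush (b, cur), some x) := by
      simp [pvStep, hmod]
    rw [hstep]
    conv_lhs => rw [show t = t.take (k - 1) ++ t.drop (k - 1) from (List.take_append_drop _ _).symm]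
    rw [PySem.List.enumerate_append, List.foldl_append]
    have htl : (t.take (k - 1)).length ≤ k - 1 := by simp
    have hnd : ∀ i : Int, o + 1 ≤ i → i < o + 1 + ((t.take (k - 1)).length : Int) → ¬ ((k : Int) ∣ i) := by
      intro i h1 h2 hdi
      have d : (k : Int) ∣ (i - o) := dvd_sub hdi hdvd
      have hle : (k : Int) ≤ i - o := Int.le_of_dvd (by omega) d
      have : ((t.take (k - 1)).length : Int) ≤ (k : Int) - 1 := by
        have := htl; omega
      omega
    rw [pv_B_inner k (t.take (k - 1)) (o + 1) (pvFlush (b, cur)) x hnd]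
    rw [pvChunks]
    by_cases hlen : k - 1 ≤ t.length
    · have hoff : o + 1 + ((t.take (k - 1)).length : Int) = o + (k : Int) := by
        rw [List.length_take]; push_cast; omega
      rw [hoff]
      rw [ih (o + (k : Int)) (by omega) (dvd_add hdvd (dvd_refl _)) _ (some _)]
      simp [pvFlush]
    · have hdrop : t.drop (k - 1) = [] := List.drop_eq_nil_of_le (by omega)
      rw [hdrop]
      simp [PySem.List.enumerate, pvFlush, pvChunks]

-- ===== VERDICT (by name: the statement is the Claim_ definition above) =====

theorem downsample_scores_py_spec : Claim_equal_downsample_scores_py := by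
  intro scores max_bins _ hpre
  unfold Spec_downsample_scores_py downsample_scores_py downsample_scores_py_alt
  by_cases h0 : scores = []
  · simp [h0]
  · rw [if_neg h0, if_neg h0]
    by_cases h1 : (scores.length : Int) ≤ max_bins
    · rw [if_pos h1, if_pos h1]
    · rw [if_neg h1, if_neg h1]
      have hm : 0 < max_bins := hpre.resolve_left h0
      dsimp only
      obtain ⟨hb1, hb2⟩ := (PySem.Int.neg_floordiv_neg_eq_iff_of_pos
        (a := (scores.length : Int)) (q := -(PySem.Int.floordiv (-(scores.length : Int)) max_bins)) hm).mp rfl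
      have hlenpos : 0 < (scores.length : Int) := by
        cases scores with
        | nil => exact absurd rfl h0
        | cons a l => exact_mod_cast Nat.succ_pos l.length
      have hqpos : 0 < -(PySem.Int.floordiv (-(scores.length : Int)) max_bins) := by nlinarith
      have hqk : -(PySem.Int.floordiv (-(scores.length : Int)) max_bins)
          = (((-(PySem.Int.floordiv (-(scores.length : Int)) max_bins)).toNat : Nat) : Int) := by omega
      have hkpos : 0 < (-(PySem.Int.floordiv (-(scores.length : Int)) max_bins)).toNat := by omega
      simp only [Prod.mk.injEq]
      refine ⟨?_, trivial⟩
      rw [PySem.List.foldl_append_eq_flatMap, List.nil_append, hqk]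
      rw [pv_A_eq_chunks scores _ hkpos]
      rw [pv_B_outer _ hkpos scores 0 le_rfl (dvd_zero _) [] none]
      simp [pvFlush]
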